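-- pv_equiv track=rewrite | github.com/Hezhitao2021/GIMC | doc_info_process.py | extend_phrase
-- ===== SOURCE A (Python) =====
-- def extend_phrase(init_phrase, dep_dic):  #[1, 4]
--     phrase = recur(init_phrase, dep_dic)
--     new_phrases = phrase
--     new = []
--     for s in new_phrases:
--         if s in new:
--             continue
--         else:
--             new.append(s)
--     return new
--
-- def recur(init_phrase, dep_dic):  # [1,4]
--     new_phrase = []
--     for s in init_phrase:
--         name = '{}'.format(s)
--         if name not in dep_dic.keys():
--             new_phrase.append(s)
--         else:
--             extend_phrase = dep_dic[name]["phrase"]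
--             new_phrase = new_phrase + extend_phrase # [1,3,4,8,9,10]
--     t = 0
--     for st in new_phrase:
--         if '{}'.format(st) in dep_dic.keys():
--             t += 1
--     if t != 0:
--         return recur(new_phrase, dep_dic)+init_phrase
--     else:
--         return new_phrase+init_phrase   # [1,3,4,6,7,9,10]
-- ===== SOURCE B (Python) =====
-- def extend_phrase(init_phrase, dep_dic):
--     # Iterative version: expand level by level with an explicit stack of levels
--     # instead of recursion, then order-preserving dedup with a seen-set.
--     def expand(phrase):
--         out = []
--         for s in phrase:
--             entry = dep_dic.get('{}'.format(s))
--             if entry is None: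
--                 out.append(s)
--             else:
--                 out.extend(entry["phrase"])
--         return out
--     levels = []
--     cur = init_phrase
--     while True:
--         nxt = expand(cur)
--         if not any('{}'.format(x) in dep_dic for x in nxt):
--             break
--         levels.append(cur)
--         cur = nxt
--     seen = set()
--     result = []
--     for x in nxt + cur + [y for lvl in reversed(levels) for y in lvl]:
--         if x not in seen:
--             seen.add(x)
--             result.append(x)
--     return result
-- ===== Notes on version B (the rewrite author's own statement) =====
-- stated objective: faster
-- what changed: Replaces recur's recursion with an explicit while-loop over expansion levels kept on a stack (concatenated in reverse at the end) and replaces A's O(r^2) list-membership dedup with a set-based order-preserving dedup.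
import Mathlib
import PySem

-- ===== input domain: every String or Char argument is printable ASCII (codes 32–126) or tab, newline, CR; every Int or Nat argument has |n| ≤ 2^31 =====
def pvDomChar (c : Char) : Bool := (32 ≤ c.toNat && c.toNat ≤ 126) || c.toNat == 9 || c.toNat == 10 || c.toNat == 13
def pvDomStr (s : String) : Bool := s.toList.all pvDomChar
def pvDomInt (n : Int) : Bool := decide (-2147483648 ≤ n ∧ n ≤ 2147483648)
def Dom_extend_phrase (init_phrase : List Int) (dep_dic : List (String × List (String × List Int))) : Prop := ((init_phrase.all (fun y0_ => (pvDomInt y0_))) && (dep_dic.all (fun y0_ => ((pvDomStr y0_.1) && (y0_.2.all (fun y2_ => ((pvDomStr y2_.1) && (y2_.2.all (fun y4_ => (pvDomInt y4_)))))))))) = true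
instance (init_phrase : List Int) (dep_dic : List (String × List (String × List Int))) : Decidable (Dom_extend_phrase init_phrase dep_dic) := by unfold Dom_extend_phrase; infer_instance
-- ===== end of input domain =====

-- B replaces A's recursion by an explicit level-by-level loop with a stack of levels
-- and a set-based order-preserving dedup in place of A's quadratic list-membership dedup (objective: faster).


-- ===== PORT A =====
-- dep_dic[name]["phrase"]; returns [] where Python would raise KeyError (those inputs are outside Pre_)
def pvPhraseOf (dep_dic : List (String × List (String × List Int))) (name : String) : List Int :=
  match PySem.Dict.get? (PySem.Dict.mk dep_dic) name with
  | some e => (PySem.Dict.get? (PySem.Dict.mk e) "phrase").getD []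
  | none => []

-- the first loop of recur: build new_phrase
def pvExpandA (dep_dic : List (String × List (String × List Int))) (init_phrase : List Int) : List Int :=
  init_phrase.foldl (fun new_phrase s =>
    let name := PySem.Int.toStr s
    if !(PySem.Dict.contains (PySem.Dict.mk dep_dic) name) then new_phrase ++ [s]
    else new_phrase ++ pvPhraseOf dep_dic name) []

-- recur, totalised by fuel (the Python recursion has no bound; fuel dep_dic.length + 1 is
-- enough on every input Pre_ admits; on exhaustion it returns [] — unreachable inside Pre_)
def pvRecurA (dep_dic : List (String × List (String × List Int))) : Nat → List Int → List Int
  | 0, _ => []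
  | fuel + 1, init_phrase =>
    let new_phrase := pvExpandA dep_dic init_phrase
    let t : Int := new_phrase.foldl (fun t st =>
      if PySem.Dict.contains (PySem.Dict.mk dep_dic) (PySem.Int.toStr st) then t + 1 else t) 0
    if t ≠ 0 then pvRecurA dep_dic fuel new_phrase ++ init_phrase
    else new_phrase ++ init_phrase

def extend_phrase (init_phrase : List Int) (dep_dic : List (String × List (String × List Int))) : List Int :=
  let phrase := pvRecurA dep_dic (dep_dic.length + 1) init_phrase
  phrase.foldl (fun new s => if new.contains s then new else new ++ [s]) []

-- ===== PORT B =====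
-- expand(phrase): dep_dic.get(str(s)) and match on None
def pvExpandB (dep_dic : List (String × List (String × List Int))) (phrase : List Int) : List Int :=
  phrase.foldl (fun out s =>
    match PySem.Dict.get? (PySem.Dict.mk dep_dic) (PySem.Int.toStr s) with
    | none => out ++ [s]
    | some entry => out ++ (PySem.Dict.get? (PySem.Dict.mk entry) "phrase").getD []) []

-- the while loop, totalised by the same fuel; returns (final nxt) ++ cur ++ flatten(reversed levels)
def pvLoopB (dep_dic : List (String × List (String × List Int))) : Nat → List Int → List (List Int) → List Int
  | 0, _, levels => levels.reverse.flatten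
  | fuel + 1, cur, levels =>
    let nxt := pvExpandB dep_dic cur
    if nxt.any (fun x => PySem.Dict.contains (PySem.Dict.mk dep_dic) (PySem.Int.toStr x)) then
      pvLoopB dep_dic fuel nxt (levels ++ [cur])
    else nxt ++ cur ++ levels.reverse.flatten

def extend_phrase_alt (init_phrase : List Int) (dep_dic : List (String × List (String × List Int))) : List Int :=
  let pre := pvLoopB dep_dic (dep_dic.length + 1) init_phrase []
  (pre.foldl (fun st x =>
      if PySem.Set.contains st.2 x then st else (st.1 ++ [x], PySem.Set.add st.2 x))
    (([] : List Int), ([] : PySem.Set Int))).1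

-- ===== PRECONDITION & SPEC =====
-- dependency graph over dep_dic's keys, restricted to keys reachable from init_phrase
def pvSuccs (dep_dic : List (String × List (String × List Int))) (k : String) : List String :=
  ((pvPhraseOf dep_dic k).map PySem.Int.toStr).filter (fun n => (dep_dic.map Prod.fst).contains n)

def pvStep (dep_dic : List (String × List (String × List Int))) (S : List String) : List String :=
  (S ++ S.flatMap (pvSuccs dep_dic)).dedup

def pvReach (dep_dic : List (String × List (String × List Int))) (S : List String) : List String :=
  (pvStep dep_dic)^[dep_dic.length + 1] S

def pvInitKeys (init_phrase : List Int) (dep_dic : List (String × List (String × List Int))) : List String :=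
  (init_phrase.map PySem.Int.toStr).filter (fun n => (dep_dic.map Prod.fst).contains n)

-- Pre_ excludes exactly the inputs where Python A does not return: a dependency key reachable
-- from init_phrase lying on a cycle (A recurses forever / RecursionError), or a reachable key
-- whose entry has no "phrase" key (A raises KeyError).
def Pre_extend_phrase (init_phrase : List Int) (dep_dic : List (String × List (String × List Int))) : Prop :=
  (pvReach dep_dic (pvInitKeys init_phrase dep_dic)).all (fun k =>
    !((pvReach dep_dic (pvSuccs dep_dic k)).contains k) &&
    (match PySem.Dict.get? (PySem.Dict.mk dep_dic) k with
     | some e => PySem.Dict.contains (PySem.Dict.mk e) "phrase"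
     | none => true)) = true

instance (init_phrase : List Int) (dep_dic : List (String × List (String × List Int))) : Decidable (Pre_extend_phrase init_phrase dep_dic) := by unfold Pre_extend_phrase; infer_instance

def pvWitness_extend_phrase : List Int × (List (String × List (String × List Int))) :=
  ([1, 2], [("1", [("phrase", [3, 4])])])

def Spec_extend_phrase (init_phrase : List Int) (dep_dic : List (String × List (String × List Int))) (out : List Int) : Prop := out = extend_phrase_alt init_phrase dep_dic
instance (init_phrase : List Int) (dep_dic : List (String × List (String × List Int))) (out : List Int) : Decidable (Spec_extend_phrase init_phrase dep_dic out) := by unfold Spec_extend_phrase; infer_instance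

-- ===== CLAIM (what is proved, stated in full; the proofs are below) =====
def Claim_equal_extend_phrase : Prop := ∀ (init_phrase : List Int) (dep_dic : List (String × List (String × List Int))), Dom_extend_phrase init_phrase dep_dic → Pre_extend_phrase init_phrase dep_dic → Spec_extend_phrase init_phrase dep_dic (extend_phrase init_phrase dep_dic)

-- ===== LEMMAS AND PROOFS =====

-- the two expansion loops build the same list
theorem pvExpand_eq (dep_dic : List (String × List (String × List Int))) (phrase : List Int) :
    pvExpandB dep_dic phrase = pvExpandA dep_dic phrase := by
  unfold pvExpandA pvExpandB
  apply PySem.List.foldl_congr_mem'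
  intro s _ acc
  simp only [pvPhraseOf, PySem.Dict.contains_eq_isSome_get?]
  cases PySem.Dict.get? (PySem.Dict.mk dep_dic) (PySem.Int.toStr s) <;> simp

-- A's t-count is non-zero exactly when B's any-test fires
theorem pvT_any (dep_dic : List (String × List (String × List Int))) (xs : List Int) :
    (xs.foldl (fun t st =>
        if PySem.Dict.contains (PySem.Dict.mk dep_dic) (PySem.Int.toStr st) then t + 1 else t) (0 : Int) ≠ 0)
    ↔ xs.any (fun x => PySem.Dict.contains (PySem.Dict.mk dep_dic) (PySem.Int.toStr x)) = true := by
  rw [PySem.List.foldl_if_add_one]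
  simp [List.any_eq_true, List.countP_eq_zero]

-- the loop with its level stack computes recur's value followed by the stacked levels
theorem pvLoopB_eq_recurA (dep_dic : List (String × List (String × List Int))) :
    ∀ (fuel : Nat) (cur : List Int) (levels : List (List Int)),
      pvLoopB dep_dic fuel cur levels = pvRecurA dep_dic fuel cur ++ levels.reverse.flatten := by
  intro fuel
  induction fuel with
  | zero => intro cur levels; simp [pvLoopB, pvRecurA]
  | succ f ih =>
    intro cur levels
    rw [pvLoopB, pvRecurA]
    simp only [pvExpand_eq]
    by_cases h : (pvExpandA dep_dic cur).any
        (fun x => PySem.Dict.contains (PySem.Dict.mk dep_dic) (PySem.Int.toStr x)) = true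
    · rw [if_pos h, if_pos ((pvT_any dep_dic _).mpr h), ih]
      simp
    · rw [if_neg h, if_neg (fun ht => h ((pvT_any dep_dic _).mp ht))]

-- B's set-based dedup equals A's list-membership dedup, given seen ≡ members of out
theorem pvDedup_eq (l : List Int) :
    ∀ (out : List Int) (seen : PySem.Set Int),
      (∀ x : Int, PySem.Set.contains seen x = out.contains x) →
      (l.foldl (fun st x =>
          if PySem.Set.contains st.2 x then st else (st.1 ++ [x], PySem.Set.add st.2 x))
        (out, seen)).1
      = l.foldl (fun new s => if new.contains s then new else new ++ [s]) out := by
  induction l with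
  | nil => intro out seen _; rfl
  | cons x t ih =>
    intro out seen hinv
    simp only [List.foldl_cons, hinv x]
    by_cases hx : out.contains x = true
    · rw [if_pos hx, if_pos hx]
      exact ih out seen hinv
    · rw [if_neg hx, if_neg hx]
      apply ih
      have hxs : x ∉ seen := by
        intro hm
        apply hx
        rw [← hinv x]
        exact (PySem.Set.contains_iff seen x).mpr hm
      rw [PySem.Set.add_of_not_mem hxs]
      intro y
      simp [show (decide (y ∈ seen)) = (decide (y ∈ out)) from by simpa using hinv y]

-- ===== VERDICT (by name: the statement is the Claim_ definition above) =====
theorem extend_phrase_spec : Claim_equal_extend_phrase := by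
  intro init_phrase dep_dic _ _
  unfold Spec_extend_phrase extend_phrase extend_phrase_alt
  rw [pvLoopB_eq_recurA]
  rw [pvDedup_eq _ [] [] (fun x => rfl)]
  simp
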